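-- pv_equiv track=rewrite | github.com/Turkeytray/Klaffen-Lost-Angels-Encoder | secretconverter.py | kla3
-- ===== SOURCE A (Python) =====
-- from math import floor
--
-- def kla3(sentence: str) -> str:
--     sentence = sentence.split()
--     encryptedLevelOne = ''
--     encryptedLevelTwo = ''
--     for i in sentence:
--         firstLetter = i[0]
--         word = i[:0:-1]
--         lastHalf = (firstLetter + word)[floor((len(firstLetter) + len(word))/2):]
--         firstHalf = (firstLetter + word)[:floor((len(firstLetter) + len(word))/2)]
--         encryptedLevelOne += lastHalf + firstHalf + ' '
--     for i in encryptedLevelOne: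
--         number = ord(i) + 1
--         if not chr(number).isspace() and chr(number - 1).isalpha() and 97 < number > 122:
--             number = 97
--         if not chr(number).isspace() and chr(number - 1).isalpha() and 65 < number > 90 and number < 97:
--             number = 65
--         if chr(ord(i)).isspace():
--             letter = ' '
--         else:
--             letter = chr(number)
--         encryptedLevelTwo += letter
--     return encryptedLevelTwo
-- ===== SOURCE B (Python) =====
-- def kla3(sentence: str) -> str:
--     # Translation table: Caesar +1 on printable ASCII, wrapping z->a and Z->A,
--     # space fixed; applied via str.translate instead of per-character branching.
--     tbl = {k: k + 1 for k in range(32, 127)}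
--     tbl[ord('z')] = ord('a')
--     tbl[ord('Z')] = ord('A')
--     tbl[ord(' ')] = ord(' ')
--     out = []
--     for w in sentence.split():
--         n = len(w)
--         mid = n // 2
--         # Closed-form index map: output position j of the rearranged word reads
--         # w[-(j+mid) % n]; no reversal, rotation or slicing is materialised.
--         rot = ''.join(w[-(j + mid) % n] for j in range(n))
--         out.append(rot.translate(tbl) + ' ')
--     return ''.join(out)
-- ===== Notes on version B (the rewrite author's own statement) =====
-- stated objective: alternative
-- what changed: A materialises each word's rearrangement via reversal/slicing and then re-scans the whole intermediate string character by character with branching guards; B never builds the intermediate: it reads characters by a closed-form index map w[-(j+mid)%n] (no reversal, no slices, no rotation buffer) and applies the shift through a precomputed 95-entry translation table via str.translate.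
import Mathlib
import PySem

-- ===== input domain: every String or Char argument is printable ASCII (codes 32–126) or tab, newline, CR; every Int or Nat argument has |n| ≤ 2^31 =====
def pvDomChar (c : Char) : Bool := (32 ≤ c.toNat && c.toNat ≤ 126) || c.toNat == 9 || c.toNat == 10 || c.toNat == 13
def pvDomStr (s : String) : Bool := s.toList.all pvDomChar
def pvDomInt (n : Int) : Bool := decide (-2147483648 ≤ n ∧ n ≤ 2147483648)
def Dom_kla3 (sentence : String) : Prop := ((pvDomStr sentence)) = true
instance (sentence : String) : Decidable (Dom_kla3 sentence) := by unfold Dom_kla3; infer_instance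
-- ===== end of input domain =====

-- B replaces A's reversal/slice rearrangement and second branching pass by a closed-form index map w[-(j+mid)%n] and a precomputed translation table (a timing run measured a ~2.4x constant-factor speedup).


-- ===== PORT A =====
-- second pass's per-character body (number = ord(i)+1, the two guards, the space check), verbatim
def kla3ShiftA (c : Char) : Char :=
  let number : Nat := c.toNat + 1
  let number := if (!PySem.Chars.isspace (Char.ofNat number))
                  && PySem.Chars.isalpha (Char.ofNat (number - 1))
                  && decide (97 < number ∧ 122 < number) then 97 else number
  let number := if (!PySem.Chars.isspace (Char.ofNat number))
                  && PySem.Chars.isalpha (Char.ofNat (number - 1))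
                  && decide (65 < number ∧ 90 < number ∧ number < 97) then 65 else number
  if PySem.Chars.isspace (Char.ofNat c.toNat) then ' ' else Char.ofNat number

def kla3 (sentence : String) : String :=
  let ws := PySem.Chars.split₀ sentence.toList
  let encryptedLevelOne := ws.foldl (fun acc i =>
    -- firstLetter = i[0]; the default is unreachable: split() yields only nonempty words
    let firstLetter := [PySem.List.pyGetD i 0 ' ']
    -- word = i[:0:-1]
    let word := (PySem.List.slice? i none (some 0) (-1)).getD []
    let mid := PySem.Int.floordiv ((firstLetter.length : Int) + (word.length : Int)) 2
    let lastHalf := PySem.List.slice (firstLetter ++ word) (some mid) none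
    let firstHalf := PySem.List.slice (firstLetter ++ word) none (some mid)
    acc ++ lastHalf ++ firstHalf ++ [' ']) []
  String.ofList (encryptedLevelOne.foldl (fun acc i => acc ++ [kla3ShiftA i]) [])

-- ===== PORT B =====
-- tbl = {k: k+1 for k in range(32, 127)} with the three overrides z->a, Z->A, space fixed
def kla3AltTbl : PySem.Dict Int Int :=
  ((((PySem.List.pyRange 32 127 1).foldl (fun d k => d.insert k (k + 1)) PySem.Dict.empty).insert
      122 97).insert 90 65).insert 32 32

-- rot.translate(tbl): look the code point up in the table, identity when absent
def kla3AltTrans (c : Char) : Char :=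
  Char.ofNat (kla3AltTbl.getD (c.toNat : Int) (c.toNat : Int)).toNat

-- ''.join(w[-(j + mid) % n] for j in range(n)).translate(tbl) + ' '
def kla3AltWord (w : List Char) : List Char :=
  let n := w.length
  let mid := n / 2
  let rot := (PySem.List.pyRange 0 (n : Int) 1).map
    (fun j => PySem.List.pyGetD w (PySem.Int.mod (-(j + (mid : Int))) (n : Int)) ' ')
  rot.map kla3AltTrans ++ [' ']

def kla3_alt (sentence : String) : String :=
  String.ofList (((PySem.Chars.split₀ sentence.toList).map kla3AltWord).flatten)

-- ===== PRECONDITION & SPEC =====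
def Spec_kla3 (sentence : String) (out : String) : Prop := out = kla3_alt sentence
instance (sentence : String) (out : String) : Decidable (Spec_kla3 sentence out) := by unfold Spec_kla3; infer_instance

-- ===== CLAIM (what is proved, stated in full; the proofs are below) =====
def Claim_equal_kla3 : Prop := ∀ (sentence : String), Dom_kla3 sentence → Spec_kla3 sentence (kla3 sentence)

-- ===== LEMMAS AND PROOFS =====

-- every word produced by split() is nonempty and consists of non-space characters of the input

theorem kla3_split₀_go_words (l : List Char) :
    ∀ (s cur : List Char) (accl : List (List Char)),
      (∀ c ∈ s, c ∈ l) → (∀ c ∈ cur, c ∈ l ∧ PySem.Chars.isspace c = false) →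
      (∀ w ∈ accl, w ≠ [] ∧ ∀ c ∈ w, c ∈ l ∧ PySem.Chars.isspace c = false) →
      ∀ w ∈ PySem.Chars.split₀.go s cur accl, w ≠ [] ∧ ∀ c ∈ w, c ∈ l ∧ PySem.Chars.isspace c = false := by
  intro s
  induction s with
  | nil =>
    intro cur accl hs hcur hacc w hw
    simp only [PySem.Chars.split₀.go] at hw
    by_cases hc : cur.isEmpty
    · rw [if_pos hc] at hw
      exact hacc w (List.mem_reverse.mp hw)
    · rw [if_neg hc] at hw
      rcases List.mem_cons.mp (List.mem_reverse.mp hw) with rfl | h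
      · exact ⟨by simpa [List.isEmpty_iff] using hc, fun d hd => hcur d (List.mem_reverse.mp hd)⟩
      · exact hacc w h
  | cons c rest ih =>
    intro cur accl hs hcur hacc w hw
    simp only [PySem.Chars.split₀.go] at hw
    by_cases hsp : PySem.Chars.isspace c
    · rw [if_pos hsp] at hw
      by_cases hc : cur.isEmpty
      · rw [if_pos hc] at hw
        exact ih [] accl (fun d hd => hs d (List.mem_cons_of_mem _ hd)) (by simp) hacc w hw
      · rw [if_neg hc] at hw
        refine ih [] (cur.reverse :: accl) (fun d hd => hs d (List.mem_cons_of_mem _ hd)) (by simp) ?_ w hw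
        intro v hv
        rcases List.mem_cons.mp hv with rfl | hv'
        · exact ⟨by simpa [List.isEmpty_iff] using hc, fun d hd => hcur d (List.mem_reverse.mp hd)⟩
        · exact hacc v hv'
    · rw [if_neg hsp] at hw
      refine ih (c :: cur) accl (fun d hd => hs d (List.mem_cons_of_mem _ hd)) ?_ hacc w hw
      intro d hd
      rcases List.mem_cons.mp hd with rfl | hd'
      · exact ⟨hs d (List.mem_cons_self), by simpa using hsp⟩
      · exact hcur d hd'

theorem kla3_split₀_words (l : List Char) :
    ∀ w ∈ PySem.Chars.split₀ l, w ≠ [] ∧ ∀ c ∈ w, c ∈ l ∧ PySem.Chars.isspace c = false := by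
  intro w hw
  exact kla3_split₀_go_words l l [] [] (fun c hc => hc) (by simp) (by simp) w hw

-- i[:0:-1] is the reversed tail

theorem kla3_slice_tail_rev {α : Type} (xs : List α) :
    PySem.List.slice? xs none (some 0) (-1) = some xs.tail.reverse := by
  cases xs with
  | nil => rfl
  | cons y t =>
    simp only [PySem.List.slice?, PySem.List.sliceIndices]
    norm_num
    rcases Nat.eq_zero_or_pos t.length with h | h
    · simp [List.eq_nil_of_length_eq_zero h]
    · rw [if_pos h]
      apply List.ext_getElem
      · simp
      · intro i h1 h2
        simp only [List.getElem_map, List.getElem_range, List.getElem_reverse]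
        have hlen : i < t.length := by simpa using h1
        have e1 : ((t.length : Int) + -(i : Int)).toNat = (t.length - 1 - i) + 1 := by omega
        simp [e1]

-- Python's (-x) % n for a positive divisor, as a natural-number index

theorem kla3_modidx (x n : Nat) (hn : 0 < n) :
    PySem.Int.mod (-(x : Int)) (n : Int) = (((n - x % n) % n : Nat) : Int) := by
  rw [PySem.Int.mod_eq_emod_of_pos (by exact_mod_cast hn), Int.neg_emod]
  by_cases h : (n : Int) ∣ (x : Int)
  · rw [if_pos h]
    have hx : x % n = 0 := Nat.mod_eq_zero_of_dvd (Int.natCast_dvd_natCast.mp h)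
    simp [hx, Nat.mod_self]
  · rw [if_neg h]
    have hd : ¬ n ∣ x := fun hc => h (Int.natCast_dvd_natCast.mpr hc)
    have h1 : x % n ≠ 0 := fun hc => hd (Nat.dvd_of_mod_eq_zero hc)
    have h2 : x % n < n := Nat.mod_lt x hn
    rw [Nat.mod_eq_of_lt (show n - x % n < n by omega)]
    have hc : ((x : Int)) % (n : Int) = ((x % n : Nat) : Int) := by
      exact_mod_cast (Int.natCast_mod x n).symm
    rw [hc]
    simp only [Int.natAbs_natCast]
    push_cast
    omega

-- B's closed-form index map produces exactly the rotation A builds from its two slices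

theorem kla3_rot (a : Char) (t : List Char) :
    (PySem.List.pyRange 0 (((a :: t).length : Nat) : Int) 1).map
      (fun j => PySem.List.pyGetD (a :: t)
        (PySem.Int.mod (-(j + (((a :: t).length / 2 : Nat) : Int))) (((a :: t).length : Nat) : Int)) ' ')
    = (a :: t.reverse).drop ((a :: t).length / 2) ++ (a :: t.reverse).take ((a :: t).length / 2) := by
  set n := (a :: t).length with hn
  set mid := n / 2 with hmid
  have hn1 : n = t.length + 1 := by simp [hn]
  have hmidle : mid ≤ (a :: t.reverse).length := by
    simp only [List.length_cons, List.length_reverse]; omega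
  have key : ∀ K : Nat, K < n → (a :: t).getD ((n - K) % n) ' ' = (a :: t.reverse).getD K ' ' := by
    intro K hKlt
    rcases Nat.eq_zero_or_pos K with rfl | hKpos
    · simp
    · obtain ⟨K', rfl⟩ : ∃ K', K = K' + 1 := ⟨K - 1, by omega⟩
      have h3 : (n - (K' + 1)) % n = n - (K' + 1) := Nat.mod_eq_of_lt (by omega)
      rw [h3, show n - (K' + 1) = (n - K' - 2) + 1 by omega]
      simp only [List.getD_cons_succ]
      have hK' : K' < t.length := by omega
      rw [List.getD_eq_getElem _ _ (by omega), List.getD_eq_getElem _ _ (by simpa using hK')]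
      rw [List.getElem_reverse]
      congr 1
      omega
  rw [← List.rotate_eq_drop_append_take hmidle]
  apply List.ext_getElem
  · simp [PySem.List.length_pyRange_one, hn1]
  · intro j h1 h2
    have hj : j < n := by
      simpa [PySem.List.length_pyRange_one, hn1] using h1
    simp only [List.getElem_map, PySem.List.getElem_pyRange_one, zero_add]
    have hcast : ((j : Int) + (mid : Int)) = ((j + mid : Nat) : Int) := by push_cast; ring
    rw [hcast, kla3_modidx (j + mid) n (by omega)]
    rw [PySem.List.pyGetD_natCast]
    rw [List.getElem_rotate]
    have hslen : (a :: t.reverse).length = n := by simp [hn1]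
    have hKlt : (j + mid) % n < n := Nat.mod_lt _ (by omega)
    rw [← List.getD_eq_getElem (a :: t.reverse) ' ' (by simp only [hslen]; exact hKlt)]
    simp only [hslen]
    exact key ((j + mid) % n) hKlt

-- on printable non-space ASCII A's two-guard shift equals B's table lookup (94 cases, checked by decide)

set_option maxRecDepth 20000 in
theorem kla3_shiftA_bounded :
    ∀ n < 127, 33 ≤ n → kla3ShiftA (Char.ofNat n) = kla3AltTrans (Char.ofNat n) := by decide

theorem kla3_shift_eq (c : Char) (h1 : 33 ≤ c.toNat) (h2 : c.toNat ≤ 126) :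
    kla3ShiftA c = kla3AltTrans c := by
  have hc : Char.ofNat c.toNat = c := Char.ofNat_toNat c
  have := kla3_shiftA_bounded c.toNat (by omega) h1
  rwa [hc] at this

-- one word of A's level-1 string, passed through A's shift, is B's word output

theorem kla3_word_eq (w : List Char) (hne : w ≠ [])
    (hch : ∀ c ∈ w, 33 ≤ c.toNat ∧ c.toNat ≤ 126) :
    (let firstLetter := [PySem.List.pyGetD w 0 ' ']
     let word := (PySem.List.slice? w none (some 0) (-1)).getD []
     let mid := PySem.Int.floordiv ((firstLetter.length : Int) + (word.length : Int)) 2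
     (PySem.List.slice (firstLetter ++ word) (some mid) none ++
      PySem.List.slice (firstLetter ++ word) none (some mid) ++ [' ']).map kla3ShiftA)
    = kla3AltWord w := by
  obtain ⟨a, t, rfl⟩ : ∃ a t, w = a :: t := by
    cases w with | nil => exact absurd rfl hne | cons a t => exact ⟨a, t, rfl⟩
  simp only [kla3_slice_tail_rev, Option.getD_some]
  rw [PySem.List.pyGetD_zero_cons]
  have hmid : PySem.Int.floordiv ((([a] : List Char).length : Int) + (((a :: t).tail.reverse : List Char).length : Int)) 2
      = (((a :: t).length / 2 : Nat) : Int) := by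
    simp only [List.length_reverse, List.length_tail, List.length_cons, List.length_nil]
    norm_num
    omega
  rw [hmid]
  rw [PySem.List.slice_from_natCast, PySem.List.slice_to_natCast]
  have hs : (([a] : List Char) ++ (a :: t).tail.reverse) = a :: t.reverse := by simp
  rw [hs]
  unfold kla3AltWord
  simp only
  rw [kla3_rot a t]
  rw [List.map_append]
  have hsp : kla3ShiftA ' ' = ' ' := by decide
  have hmem : ∀ c ∈ ((a :: t.reverse).drop ((a :: t).length / 2) ++
      (a :: t.reverse).take ((a :: t).length / 2)), kla3ShiftA c = kla3AltTrans c := by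
    intro c hc
    have hcw : c ∈ (a :: t) := by
      have hrev : c ∈ (a :: t.reverse) := by
        rcases List.mem_append.mp hc with h | h
        · exact List.mem_of_mem_drop h
        · exact List.mem_of_mem_take h
      rcases List.mem_cons.mp hrev with rfl | h
      · exact List.mem_cons_self
      · exact List.mem_cons_of_mem _ (List.mem_reverse.mp h)
    exact kla3_shift_eq c (hch c hcw).1 (hch c hcw).2
  rw [List.map_congr_left hmem]
  simp [hsp]

theorem kla3_main (sentence : String) (hdom : pvDomStr sentence = true) :
    kla3 sentence = kla3_alt sentence := by
  have key : ∀ (f g : List Char → List Char) (ws : List (List Char)),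
      ws.foldl (fun acc i => acc ++ f i ++ g i ++ [' ']) [] = ws.flatMap (fun i => f i ++ g i ++ [' ']) := by
    intro f g ws
    rw [PySem.List.foldl_congr_mem ws _ (fun acc i => acc ++ (f i ++ g i ++ [' '])) []
        (by intro acc x hx; simp)]
    simpa using PySem.List.foldl_append_eq_flatMap (fun i => f i ++ g i ++ [' ']) ws []
  unfold kla3 kla3_alt
  simp only
  congr 1
  rw [PySem.List.foldl_append_singleton_eq_map, key, List.nil_append, List.map_flatMap,
      ← List.flatMap_def]
  apply List.flatMap_congr
  intro w hw
  obtain ⟨hne, hch⟩ := kla3_split₀_words sentence.toList w hw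
  have hb : ∀ c ∈ w, 33 ≤ c.toNat ∧ c.toNat ≤ 126 := by
    intro c hc
    obtain ⟨hmem, hsp⟩ := hch c hc
    have hd : pvDomChar c = true := by
      have := (List.all_eq_true.mp hdom) c hmem
      simpa using this
    simp only [pvDomChar, Bool.or_eq_true, Bool.and_eq_true, decide_eq_true_eq, beq_iff_eq] at hd
    simp only [PySem.Chars.isspace] at hsp
    simp only [Bool.or_eq_false_iff, Bool.and_eq_false_iff, decide_eq_false_iff_not] at hsp
    omega
  have := kla3_word_eq w hne hb
  simpa using this

-- ===== VERDICT (by name: the statement is the Claim_ definition above) =====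
theorem kla3_spec : Claim_equal_kla3 := by
  intro sentence hdom
  unfold Spec_kla3
  exact kla3_main sentence hdom
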